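-- pv_equiv track=rewrite | github.com/BM32ESRF/lauetools | LaueTools/generaltools.py | threeindicesfamily
-- ===== SOURCE A (Python) =====
-- def threeindicesfamily(n):
--     """
--     #TODO to be OPTIMIZED
--     remove harmonics
--     """
--     listhkl = []
--     for hh in list(range(n + 1)):
--         for kk in list(range(n + 1)):
--             for ll in list(range(n + 1)):
--                 if hh >= kk and kk >= ll:
--                     listhkl.append([hh, kk, ll])
--     return listhkl[1:]
-- ===== SOURCE B (Python) =====
-- def threeindicesfamily(n):
--     # Single pass maintaining the triangular pair set incrementally: after step
--     # hh, `pairs` holds every (k, l) with l <= k <= hh in enumeration order, so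
--     # each hh's triples are just hh prefixed to the accumulated pairs -- the
--     # inner double loop of the cube scan is never re-run.
--     pairs = []
--     listhkl = []
--     for hh in range(n + 1):
--         pairs += [(hh, l) for l in range(hh + 1)]
--         listhkl += [[hh, k, l] for (k, l) in pairs]
--     return listhkl[1:]
-- ===== Notes on version B (the rewrite author's own statement) =====
-- stated objective: alternative
-- what changed: Replaces the (n+1)^3 cube scan with an if-filter by a single pass that incrementally maintains the list of admissible (k,l) pairs and prefixes hh to it, so no nested rescans or filtering occur.
import Mathlib
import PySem

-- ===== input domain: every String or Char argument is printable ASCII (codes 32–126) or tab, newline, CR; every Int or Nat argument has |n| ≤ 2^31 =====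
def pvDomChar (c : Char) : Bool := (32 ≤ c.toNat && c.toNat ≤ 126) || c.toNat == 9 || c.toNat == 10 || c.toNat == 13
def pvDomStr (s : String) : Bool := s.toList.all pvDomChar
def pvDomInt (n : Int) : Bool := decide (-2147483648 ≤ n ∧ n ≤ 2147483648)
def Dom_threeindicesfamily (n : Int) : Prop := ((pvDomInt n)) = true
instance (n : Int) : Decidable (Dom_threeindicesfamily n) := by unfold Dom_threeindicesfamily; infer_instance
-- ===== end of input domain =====

-- B replaces A's cube scan with a filter by a single pass that incrementally grows
-- the admissible (k,l) pair list and prefixes hh to it (objective: alternative).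

-- ===== PORT A =====
def threeindicesfamily (n : Int) : List (List Int) :=
  let listhkl := (PySem.List.pyRange 0 (n + 1) 1).foldl (fun a1 hh =>
      (PySem.List.pyRange 0 (n + 1) 1).foldl (fun a2 kk =>
        (PySem.List.pyRange 0 (n + 1) 1).foldl (fun a3 ll =>
          if hh ≥ kk ∧ kk ≥ ll then a3 ++ [[hh, kk, ll]] else a3) a2) a1) []
  PySem.List.slice listhkl (some 1) none

-- ===== PORT B =====
def threeindicesfamily_alt (n : Int) : List (List Int) :=
  let st := (PySem.List.pyRange 0 (n + 1) 1).foldl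
    (fun (st : List (Int × Int) × List (List Int)) hh =>
      let pairs := st.1 ++ (PySem.List.pyRange 0 (hh + 1) 1).map (fun l => (hh, l))
      (pairs, st.2 ++ pairs.map (fun p => [hh, p.1, p.2])))
    ([], [])
  PySem.List.slice st.2 (some 1) none

-- ===== PRECONDITION & SPEC =====
def Spec_threeindicesfamily (n : Int) (out : List (List Int)) : Prop := out = threeindicesfamily_alt n
instance (n : Int) (out : List (List Int)) : Decidable (Spec_threeindicesfamily n out) := by unfold Spec_threeindicesfamily; infer_instance

-- ===== CLAIM (what is proved, stated in full; the proofs are below) =====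
def Claim_equal_threeindicesfamily : Prop := ∀ (n : Int), Dom_threeindicesfamily n → Spec_threeindicesfamily n (threeindicesfamily n)

-- ===== LEMMAS AND PROOFS =====

-- the pair list B maintains, after all hh < m are processed
def pvPairs (m : Int) : List (Int × Int) :=
  (PySem.List.pyRange 0 m 1).flatMap (fun kk =>
    (PySem.List.pyRange 0 (kk + 1) 1).map (fun l => (kk, l)))

-- the output list after all hh < m are processed
def pvOut (m : Int) : List (List Int) :=
  (PySem.List.pyRange 0 m 1).flatMap (fun hh =>
    (pvPairs (hh + 1)).map (fun p => [hh, p.1, p.2]))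

-- loop invariant of B's single pass
theorem pv_fold_inv (m : Nat) :
    (PySem.List.pyRange 0 (m : Int) 1).foldl
      (fun (st : List (Int × Int) × List (List Int)) hh =>
        let pairs := st.1 ++ (PySem.List.pyRange 0 (hh + 1) 1).map (fun l => (hh, l))
        (pairs, st.2 ++ pairs.map (fun p => [hh, p.1, p.2])))
      ([], []) = (pvPairs (m : Int), pvOut (m : Int)) := by
  induction m with
  | zero => simp [pvPairs, pvOut, PySem.List.pyRange_one_eq_nil (by omega : (0:Int) ≤ 0)]
  | succ k ih =>
    have hsplit : PySem.List.pyRange 0 ((k : Int) + 1) 1 =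
        PySem.List.pyRange 0 (k : Int) 1 ++ [(k : Int)] :=
      PySem.List.pyRange_one_succ_right (by omega)
    have hpairs : pvPairs ((k : Int) + 1) =
        pvPairs (k : Int) ++ (PySem.List.pyRange 0 ((k : Int) + 1) 1).map (fun l => ((k : Int), l)) := by
      simp [pvPairs, hsplit]
    have hout : pvOut ((k : Int) + 1) =
        pvOut (k : Int) ++ (pvPairs ((k : Int) + 1)).map (fun p => [(k : Int), p.1, p.2]) := by
      simp [pvOut, hsplit]
    push_cast
    rw [hsplit, List.foldl_append, ih]
    simp only [List.foldl_cons, List.foldl_nil]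
    rw [hout, hpairs]

-- B's list equals the triangular flatMap form
theorem pv_alt_eq (n : Int) :
    threeindicesfamily_alt n = PySem.List.slice
      ((PySem.List.pyRange 0 (n + 1) 1).flatMap (fun hh =>
        (PySem.List.pyRange 0 (hh + 1) 1).flatMap (fun kk =>
          (PySem.List.pyRange 0 (kk + 1) 1).map (fun ll => [hh, kk, ll]))))
      (some 1) none := by
  unfold threeindicesfamily_alt
  by_cases hn : n + 1 ≤ 0
  · rw [PySem.List.pyRange_one_eq_nil hn]; rfl
  · obtain ⟨m, hm⟩ : ∃ m : Nat, n + 1 = (m : Int) := ⟨(n + 1).toNat, by omega⟩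
    rw [hm, pv_fold_inv m]
    show PySem.List.slice (pvOut (m : Int)) (some 1) none = _
    congr 1
    rw [pvOut]
    apply List.flatMap_congr
    intro hh hhmem
    have hb := (PySem.List.mem_pyRange_one).mp hhmem
    rw [pvPairs, List.map_flatMap]
    apply List.flatMap_congr
    intro kk _
    rw [List.map_map]
    exact (List.map_eq_flatMap).symm ▸ rfl

-- filter of the full range 0..n by (· ≤ k) is the range 0..k, for 0 ≤ k ≤ n
theorem pv_filter_range (n k : Int) (h0 : 0 ≤ k) (hk : k ≤ n) :
    (PySem.List.pyRange 0 (n + 1) 1).filter (fun ll => decide (k ≥ ll)) =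
      PySem.List.pyRange 0 (k + 1) 1 := by
  rw [PySem.List.pyRange_one_append 0 (k + 1) (n + 1) (by omega) (by omega), List.filter_append]
  have h1 : (PySem.List.pyRange 0 (k + 1) 1).filter (fun ll => decide (k ≥ ll)) =
      PySem.List.pyRange 0 (k + 1) 1 := by
    apply List.filter_eq_self.mpr
    intro x hx
    have := (PySem.List.mem_pyRange_one).mp hx
    simp; omega
  have h2 : (PySem.List.pyRange (k + 1) (n + 1) 1).filter (fun ll => decide (k ≥ ll)) = [] := by
    apply List.filter_eq_nil_iff.mpr
    intro x hx
    have := (PySem.List.mem_pyRange_one).mp hx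
    simp; omega
  rw [h1, h2, List.append_nil]

-- A's middle+inner double loop (as a flatMap) equals the triangular one, for 0 ≤ hh ≤ n
theorem pv_inner2 (n hh : Int) (h0 : 0 ≤ hh) (hn : hh ≤ n) :
    (PySem.List.pyRange 0 (n + 1) 1).flatMap (fun kk =>
        ((PySem.List.pyRange 0 (n + 1) 1).filter
          (fun ll => decide (hh ≥ kk ∧ kk ≥ ll))).map (fun ll => [hh, kk, ll])) =
      (PySem.List.pyRange 0 (hh + 1) 1).flatMap (fun kk =>
        (PySem.List.pyRange 0 (kk + 1) 1).map (fun ll => [hh, kk, ll])) := by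
  have hG : (PySem.List.pyRange 0 (n + 1) 1).flatMap (fun kk =>
        ((PySem.List.pyRange 0 (n + 1) 1).filter
          (fun ll => decide (hh ≥ kk ∧ kk ≥ ll))).map (fun ll => [hh, kk, ll])) =
      (PySem.List.pyRange 0 (n + 1) 1).flatMap (fun kk =>
        if hh ≥ kk then (PySem.List.pyRange 0 (kk + 1) 1).map (fun ll => [hh, kk, ll]) else []) := by
    apply List.flatMap_congr
    intro kk hkk
    have hkb := (PySem.List.mem_pyRange_one).mp hkk
    by_cases hc : hh ≥ kk
    · rw [if_pos hc]
      have hfc : (PySem.List.pyRange 0 (n + 1) 1).filter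
          (fun ll => decide (hh ≥ kk ∧ kk ≥ ll)) =
          (PySem.List.pyRange 0 (n + 1) 1).filter (fun ll => decide (kk ≥ ll)) := by
        apply List.filter_congr
        intro x hx
        simp; omega
      rw [hfc, pv_filter_range n kk (by omega) (by omega)]
    · rw [if_neg hc]
      have hf : (PySem.List.pyRange 0 (n + 1) 1).filter
          (fun ll => decide (hh ≥ kk ∧ kk ≥ ll)) = [] := by
        apply List.filter_eq_nil_iff.mpr
        intro x hx
        simp; omega
      rw [hf]; rfl
  rw [hG, PySem.List.pyRange_one_append 0 (hh + 1) (n + 1) (by omega) (by omega),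
    List.flatMap_append]
  have h2 : (PySem.List.pyRange (hh + 1) (n + 1) 1).flatMap (fun kk =>
      if hh ≥ kk then (PySem.List.pyRange 0 (kk + 1) 1).map (fun ll => [hh, kk, ll]) else []) = [] := by
    apply List.flatMap_eq_nil_iff.mpr
    intro kk hkk
    have := (PySem.List.mem_pyRange_one).mp hkk
    rw [if_neg (by omega)]
  rw [h2, List.append_nil]
  apply List.flatMap_congr
  intro kk hkk
  have := (PySem.List.mem_pyRange_one).mp hkk
  rw [if_pos (by omega)]

-- ===== VERDICT (by name: the statement is the Claim_ definition above) =====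
theorem threeindicesfamily_spec : Claim_equal_threeindicesfamily := by
  intro n _
  show threeindicesfamily n = threeindicesfamily_alt n
  rw [pv_alt_eq]
  unfold threeindicesfamily
  simp only [PySem.List.foldl_append_ite, PySem.List.foldl_append_eq_flatMap, List.nil_append]
  congr 1
  apply List.flatMap_congr
  intro hh hhh
  have hb := (PySem.List.mem_pyRange_one).mp hhh
  exact pv_inner2 n hh (by omega) (by omega)
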